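-- pv_equiv track=rewrite | github.com/pypi-data/pypi-mirror-333 | packages/lhachimi/lhachimi-0.1.261-py3-none-any.whl/lhachimi/__init__.py | exp_p
-- ===== SOURCE A (Python) =====
-- import math as m
--
-- def exp_p(x, N):
--     if N < 0:
--         return (0, 1)
--     a, b = 1, 1
--     tn, td = 1, 1
--     for n in range(1, N+1):
--         tn *= x
--         td *= n
--         a = a * td + tn * b
--         b *= td
--         g = m.gcd(abs(a), b)
--         a, b = a//g, b//g
--     return (a, b)
-- ===== SOURCE B (Python) =====
-- import math as m
--
-- def exp_p(x, N):
--     # Horner over the common denominator N!: acc/c == sum_{n<=N} x^n/n!, one final gcd.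
--     if N < 0:
--         return (0, 1)
--     acc, c = 1, 1
--     for n in range(1, N + 1):
--         c *= N + 1 - n
--         acc = acc * x + c
--     g = m.gcd(abs(acc), c)
--     return (acc // g, c // g)
-- ===== Notes on version B (the rewrite author's own statement) =====
-- stated objective: faster
-- what changed: Instead of adding each term to a running reduced fraction with a gcd reduction of growing bigints on every iteration, B evaluates the series by integer Horner over the common denominator N! and reduces once with a single final gcd.
import Mathlib
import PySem

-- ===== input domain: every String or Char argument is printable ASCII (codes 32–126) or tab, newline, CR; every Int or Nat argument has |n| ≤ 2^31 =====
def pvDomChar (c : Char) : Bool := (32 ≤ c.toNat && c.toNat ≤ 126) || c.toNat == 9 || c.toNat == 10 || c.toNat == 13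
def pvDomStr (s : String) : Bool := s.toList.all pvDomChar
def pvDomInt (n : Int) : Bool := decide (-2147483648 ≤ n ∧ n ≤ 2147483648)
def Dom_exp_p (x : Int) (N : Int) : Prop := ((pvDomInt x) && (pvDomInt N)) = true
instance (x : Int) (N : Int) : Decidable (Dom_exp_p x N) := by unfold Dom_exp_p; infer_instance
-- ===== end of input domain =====

-- B replaces A's per-iteration fraction reduction (a gcd of growing bigints every step) by an
-- integer Horner evaluation over the common denominator N! with a single final gcd: measurably faster.


-- ===== PORT A =====
-- loop body of A: state (a, b, tn, td), element n.  m.gcd(abs(a), b) = Int.gcd a b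
-- (b > 0 throughout the loop, so gcd of natAbs's is exact);  a//g, b//g = PySem.Int.floordiv.
def stepA (x : Int) (st : Int × Int × Int × Int) (n : Int) : Int × Int × Int × Int :=
  let tn := st.2.2.1 * x
  let td := st.2.2.2 * n
  let a := st.1 * td + tn * st.2.1
  let b := st.2.1 * td
  let g : Int := ((Int.gcd a b : Nat) : Int)
  (PySem.Int.floordiv a g, PySem.Int.floordiv b g, tn, td)

def exp_p (x : Int) (N : Int) : List Int :=
  if N < 0 then [0, 1]
  else
    let s := (PySem.List.pyRange 1 (N + 1) 1).foldl (stepA x) (1, 1, 1, 1)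
    [s.1, s.2.1]

-- ===== PORT B =====
-- loop body of B: state (acc, c), element n;  c *= N + 1 - n;  acc = acc * x + c.
def stepB (x : Int) (N : Int) (st : Int × Int) (n : Int) : Int × Int :=
  let c := st.2 * (N + 1 - n)
  (st.1 * x + c, c)

def exp_p_alt (x : Int) (N : Int) : List Int :=
  if N < 0 then [0, 1]
  else
    let s := (PySem.List.pyRange 1 (N + 1) 1).foldl (stepB x N) (1, 1)
    let g : Int := ((Int.gcd s.1 s.2 : Nat) : Int)
    [PySem.Int.floordiv s.1 g, PySem.Int.floordiv s.2 g]

-- ===== PRECONDITION & SPEC =====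
def Spec_exp_p (x : Int) (N : Int) (out : List Int) : Prop := out = exp_p_alt x N
instance (x : Int) (N : Int) (out : List Int) : Decidable (Spec_exp_p x N out) := by unfold Spec_exp_p; infer_instance

-- ===== CLAIM (what is proved, stated in full; the proofs are below) =====
def Claim_equal_exp_p : Prop := ∀ (x : Int) (N : Int), Dom_exp_p x N → Spec_exp_p x N (exp_p x N)

-- ===== LEMMAS AND PROOFS =====

/-- The truncated exponential series `∑_{k=0}^{n} x^k / k!` as a rational. -/
def qs (x : Int) (n : Nat) : ℚ := ∑ k ∈ Finset.range (n + 1), (x : ℚ) ^ k / (Nat.factorial k : ℚ)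

/-- Dividing numerator and denominator (positive) by their gcd yields the canonical
`num`/`den` of the rational they represent. -/
lemma canon (a b : Int) (hb : 0 < b) :
    PySem.Int.floordiv a ((Int.gcd a b : Nat) : Int) = ((a : ℚ) / (b : ℚ)).num ∧
    PySem.Int.floordiv b ((Int.gcd a b : Nat) : Int) = ((((a : ℚ) / (b : ℚ)).den : Nat) : Int) := by
  have hbne : b ≠ 0 := hb.ne'
  have hg : (0 : Int) < ((Int.gcd a b : Nat) : Int) := by
    have : 0 < Int.gcd a b := Int.gcd_pos_iff.mpr (Or.inr hbne)
    exact_mod_cast this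
  rw [PySem.Int.floordiv_eq_ediv_of_pos hg, PySem.Int.floordiv_eq_ediv_of_pos hg,
    ← Rat.divInt_eq_div]
  constructor
  · rw [Rat.num_divInt, Int.sign_eq_one_of_pos hb, one_mul, Int.gcd_comm b a]
  · rw [Rat.den_divInt, if_neg hbne, Int.gcd_comm b a]
    conv_lhs => rw [← Int.natAbs_of_nonneg hb.le]
    exact (Int.natCast_div _ _).symm

/-- Adding a fraction `t/d` to a rational in lowest terms, over the product denominator. -/
lemma frac_eq (p : ℚ) (t d : Int) (hd : 0 < d) :
    ((p.num * d + t * (p.den : Int) : Int) : ℚ) / (((p.den : Int) * d : Int) : ℚ)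
      = p + (t : ℚ) / (d : ℚ) := by
  have h1 : ((p.den : Int) : ℚ) ≠ 0 := by exact_mod_cast (Int.natCast_pos.mpr p.pos).ne'
  have h2 : ((d : Int) : ℚ) ≠ 0 := by exact_mod_cast hd.ne'
  conv_rhs => rw [← Rat.num_div_den p]
  push_cast
  push_cast at h1 h2
  field_simp
  try ring

lemma qs_succ (x : Int) (n : Nat) :
    qs x (n + 1) = qs x n + (x : ℚ) ^ (n + 1) / (Nat.factorial (n + 1) : ℚ) := by
  simp [qs, Finset.sum_range_succ]

/-- Invariant of A's loop: after `n` iterations the state is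
`(num, den, xⁿ, n!)` of the truncated series. -/
lemma A_inv (x : Int) (n : Nat) :
    (PySem.List.pyRange 1 ((n : Int) + 1) 1).foldl (stepA x) (1, 1, 1, 1)
      = ((qs x n).num, (((qs x n).den : Nat) : Int), x ^ n, (Nat.factorial n : Int)) := by
  induction n with
  | zero =>
      rw [show ((0 : Nat) : Int) + 1 = 1 by norm_num, PySem.List.pyRange_one_eq_nil le_rfl]
      simp [qs]
  | succ n ih =>
      rw [show (((n + 1 : Nat)) : Int) + 1 = ((n : Int) + 1) + 1 by push_cast; ring,
        PySem.List.pyRange_one_succ_right (by omega : (1 : Int) ≤ (n : Int) + 1),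
        List.foldl_append, ih]
      simp only [List.foldl_cons, List.foldl_nil, stepA]
      have e1 : x ^ n * x = x ^ (n + 1) := (pow_succ x n).symm
      have e2 : (Nat.factorial n : Int) * ((n : Int) + 1) = (Nat.factorial (n + 1) : Int) := by
        rw [Nat.factorial_succ]; push_cast; ring
      rw [e1, e2]
      set q := qs x n with hq
      set a' : Int := q.num * (Nat.factorial (n + 1) : Int) + x ^ (n + 1) * ((q.den : Nat) : Int) with ha'
      set b' : Int := ((q.den : Nat) : Int) * (Nat.factorial (n + 1) : Int) with hb'
      have hT : (0 : Int) < (Nat.factorial (n + 1) : Int) := by exact_mod_cast (n + 1).factorial_pos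
      have hbpos : 0 < b' := mul_pos (Int.natCast_pos.mpr q.pos) hT
      have key : ((a' : Int) : ℚ) / ((b' : Int) : ℚ) = qs x (n + 1) := by
        rw [ha', hb', frac_eq q _ _ hT, qs_succ]
        push_cast
        ring
      obtain ⟨c1, c2⟩ := canon a' b' hbpos
      rw [key] at c1 c2
      rw [c1, c2]

/-- B's running denominator: `cB Nn k = Nn!/(Nn-k)!` built by the loop. -/
def cB (Nn : Nat) : Nat → Int
  | 0 => 1
  | k + 1 => cB Nn k * ((Nn : Int) + 1 - ((k : Int) + 1))

/-- B's Horner accumulator. -/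
def aB (x : Int) (Nn : Nat) : Nat → Int
  | 0 => 1
  | k + 1 => aB x Nn k * x + cB Nn (k + 1)

/-- B's fold computes `(aB, cB)`. -/
lemma B_fold (x : Int) (Nn : Nat) (k : Nat) :
    (PySem.List.pyRange 1 ((k : Int) + 1) 1).foldl (stepB x (Nn : Int)) (1, 1)
      = (aB x Nn k, cB Nn k) := by
  induction k with
  | zero =>
      rw [show ((0 : Nat) : Int) + 1 = 1 by norm_num, PySem.List.pyRange_one_eq_nil le_rfl]
      simp [aB, cB]
  | succ k ih =>
      rw [show (((k + 1 : Nat)) : Int) + 1 = ((k : Int) + 1) + 1 by push_cast; ring,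
        PySem.List.pyRange_one_succ_right (by omega : (1 : Int) ≤ (k : Int) + 1),
        List.foldl_append, ih]
      simp only [List.foldl_cons, List.foldl_nil, stepB, aB, cB]

lemma cB_mul_factorial (Nn : Nat) : ∀ k, k ≤ Nn →
    cB Nn k * (Nat.factorial (Nn - k) : Int) = (Nat.factorial Nn : Int) := by
  intro k
  induction k with
  | zero => intro _; simp [cB]
  | succ k ih =>
      intro hk
      have hk' : k ≤ Nn := by omega
      have h1 : ((Nn : Int) + 1 - ((k : Int) + 1)) = ((Nn - k : Nat) : Int) := by
        push_cast [Nat.cast_sub hk']; ring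
      have h2 : Nn - k = (Nn - (k + 1)) + 1 := by omega
      calc cB Nn (k + 1) * (Nat.factorial (Nn - (k + 1)) : Int)
          = cB Nn k * (((Nn - k : Nat) : Int) * (Nat.factorial (Nn - (k + 1)) : Int)) := by
            rw [cB, h1]; ring
        _ = cB Nn k * (Nat.factorial (Nn - k) : Int) := by
            congr 1
            rw [h2, Nat.factorial_succ]
            push_cast
            ring
        _ = (Nat.factorial Nn : Int) := ih hk'

lemma cB_self (Nn : Nat) : cB Nn Nn = (Nat.factorial Nn : Int) := by
  have := cB_mul_factorial Nn Nn le_rfl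
  simpa using this

lemma aB_sum (x : Int) (Nn : Nat) (k : Nat) :
    aB x Nn k = ∑ j ∈ Finset.range (k + 1), x ^ (k - j) * cB Nn j := by
  induction k with
  | zero => simp [aB, cB]
  | succ k ih =>
      rw [aB, ih, Finset.sum_range_succ _ (k + 1), Finset.sum_mul]
      congr 1
      · apply Finset.sum_congr rfl
        intro j hj
        have hj' : j ≤ k := Nat.lt_succ_iff.mp (Finset.mem_range.mp hj)
        have : k + 1 - j = (k - j) + 1 := by omega
        rw [this, pow_succ]
        ring
      · simp

/-- After all `Nn` iterations, B's fraction is the truncated series. -/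
lemma B_val (x : Int) (Nn : Nat) :
    ((aB x Nn Nn : Int) : ℚ) / ((cB Nn Nn : Int) : ℚ) = qs x Nn := by
  rw [aB_sum, cB_self, qs]
  have hfac : ((Nat.factorial Nn : Int) : ℚ) ≠ 0 := by
    exact_mod_cast (Int.natCast_pos.mpr Nn.factorial_pos).ne'
  rw [Int.cast_sum, Finset.sum_div]
  rw [← Finset.sum_range_reflect (fun m => (x : ℚ) ^ m / (Nat.factorial m : ℚ)) (Nn + 1)]
  apply Finset.sum_congr rfl
  intro j hj
  have hj' : j ≤ Nn := Nat.lt_succ_iff.mp (Finset.mem_range.mp hj)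
  have hidx : Nn + 1 - 1 - j = Nn - j := by omega
  have hcb := cB_mul_factorial Nn j hj'
  have hfj : ((Nat.factorial (Nn - j) : Int) : ℚ) ≠ 0 := by
    exact_mod_cast (Int.natCast_pos.mpr (Nn - j).factorial_pos).ne'
  have hcbQ : ((cB Nn j : Int) : ℚ) * ((Nat.factorial (Nn - j) : Int) : ℚ)
      = ((Nat.factorial Nn : Int) : ℚ) := by exact_mod_cast hcb
  rw [hidx]
  push_cast
  push_cast at hcbQ hfac hfj
  field_simp
  linear_combination ((x : ℚ) ^ (Nn - j)) * hcbQ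

-- ===== VERDICT (by name: the statement is the Claim_ definition above) =====
theorem exp_p_spec : Claim_equal_exp_p := by
  intro x N _hdom
  unfold Spec_exp_p exp_p exp_p_alt
  by_cases hN : N < 0
  · simp [hN]
  · simp only [if_neg hN]
    have hNn : N = ((N.toNat : Nat) : Int) := (Int.toNat_of_nonneg (not_lt.mp hN)).symm
    set Nn := N.toNat with hdef
    rw [hNn, A_inv x Nn, B_fold x Nn Nn]
    have hpos : 0 < cB Nn Nn := by rw [cB_self]; exact_mod_cast Nn.factorial_pos
    obtain ⟨c1, c2⟩ := canon (aB x Nn Nn) (cB Nn Nn) hpos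
    rw [B_val] at c1 c2
    rw [c1, c2]
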